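-- pv_equiv track=rewrite | github.com/MrHamdulay/csc3-capstone | examples/data/Assignment_4/mhmzah018/piglatin.py | a_pos
-- ===== SOURCE A (Python) =====
-- def a_pos(word):
--     count = 0
--     position1 = 0
--     position2 = 0
--     for i in range(len(word)-1,-1,-1):
--         if word[i] == "a":count+=1
--         if count == 2:
--             position1=i
--             count+=1
--     for i in range(len(word)-1,-1,-1):
--         if word[i] == "a":
--             position2 = i
--             break
--     return position1, position2
-- ===== SOURCE B (Python) =====
-- def a_pos(word):
--     idx = [i for i, c in enumerate(word) if c == "a"]
--     position2 = idx[-1] if idx else 0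
--     position1 = idx[-2] if len(idx) >= 2 else 0
--     return position1, position2
-- ===== Notes on version B (the rewrite author's own statement) =====
-- stated objective: simpler
-- what changed: Replaces A's two reverse scans (a counter loop that flags the second 'a' from the right, plus a break-on-first loop) with one forward pass building the list of 'a' positions and selecting its last and second-to-last entries.
import Mathlib
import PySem

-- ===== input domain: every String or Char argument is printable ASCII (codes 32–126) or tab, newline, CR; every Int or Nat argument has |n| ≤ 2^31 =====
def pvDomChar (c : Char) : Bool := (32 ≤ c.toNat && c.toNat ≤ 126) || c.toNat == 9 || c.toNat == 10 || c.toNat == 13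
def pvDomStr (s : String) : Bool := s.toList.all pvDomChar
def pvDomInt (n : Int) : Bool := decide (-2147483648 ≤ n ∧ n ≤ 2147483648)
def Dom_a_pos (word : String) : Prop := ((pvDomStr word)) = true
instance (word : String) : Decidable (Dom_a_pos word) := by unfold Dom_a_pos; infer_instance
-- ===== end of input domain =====

-- B replaces A's two reverse scans with one forward index table; same values on every input (objective: simpler).

-- ===== PORT A =====
-- second loop of A: 'for i in range(len(word)-1,-1,-1): if word[i]=="a": position2=i; break'
-- (indices come from the range, always in bounds, so pyGetD's default is never read)
def a_posLoop2 (cs : List Char) : List Int → Int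
  | [] => 0
  | i :: rest => if PySem.List.pyGetD cs i ' ' == 'a' then i else a_posLoop2 cs rest

def a_pos (word : String) : Int × Int :=
  let cs := word.toList
  let n : Int := PySem.Str.len word
  let st := (PySem.List.pyRange (n - 1) (-1) (-1)).foldl
    (fun (st : Int × Int) i =>
      let count := if PySem.List.pyGetD cs i ' ' == 'a' then st.1 + 1 else st.1
      if count = 2 then (count + 1, i) else (count, st.2)) (0, 0)
  let position2 := a_posLoop2 cs (PySem.List.pyRange (n - 1) (-1) (-1))
  (st.2, position2)

-- ===== PORT B =====
def a_pos_alt (word : String) : Int × Int :=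
  let idx := ((PySem.List.enumerate word.toList 0).filter (fun p => p.2 == 'a')).map (fun p => p.1)
  let position2 := if idx = [] then 0 else (PySem.List.pyGet? idx (-1)).getD 0
  let position1 := if 2 ≤ idx.length then (PySem.List.pyGet? idx (-2)).getD 0 else 0
  (position1, position2)

-- ===== PRECONDITION & SPEC =====
def Spec_a_pos (word : String) (out : Int × Int) : Prop := out = a_pos_alt word
instance (word : String) (out : Int × Int) : Decidable (Spec_a_pos word out) := by unfold Spec_a_pos; infer_instance

-- ===== CLAIM (what is proved, stated in full; the proofs are below) =====
def Claim_equal_a_pos : Prop := ∀ (word : String), Dom_a_pos word → Spec_a_pos word (a_pos word)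

-- ===== LEMMAS AND PROOFS =====

-- A's first-loop body as a step function on (count, position1) consuming an (index, char) pair
def pvStep (st : Int × Int) (x : Int × Char) : Int × Int :=
  let count := if x.2 == 'a' then st.1 + 1 else st.1
  if count = 2 then (count + 1, x.1) else (count, st.2)

-- positions of 'a' in cs, counted from offset s
def pvAidx (cs : List Char) (s : Int) : List Int :=
  ((PySem.List.enumerate cs s).filter (fun p => p.2 == 'a')).map (fun p => p.1)

lemma pvAidx_cons (c : Char) (cs : List Char) (s : Int) :
    pvAidx (c :: cs) s = (if c == 'a' then [s] else []) ++ pvAidx cs (s + 1) := by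
  by_cases h : c == 'a' <;> simp [pvAidx, PySem.List.enumerate_cons, h]

-- the first-loop invariant
lemma pvLoop1_inv (cs : List Char) (s : Int) :
    (PySem.List.enumerate cs s).foldr (fun x acc => pvStep acc x) (0, 0) =
      ((if (pvAidx cs s).length ≤ 1 then ((pvAidx cs s).length : Int)
        else ((pvAidx cs s).length : Int) + 1),
       if 2 ≤ (pvAidx cs s).length then (pvAidx cs s).getD ((pvAidx cs s).length - 2) 0
       else 0) := by
  induction cs generalizing s with
  | nil => simp [pvAidx, PySem.List.enumerate_nil]
  | cons c cs ih =>
    rw [PySem.List.enumerate_cons, List.foldr_cons, ih, pvAidx_cons]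
    by_cases hc : c == 'a'
    · simp only [hc, if_pos, List.singleton_append, List.length_cons]
      rcases hl : (pvAidx cs (s + 1)).length with _ | _ | k
      · rcases (List.length_eq_zero_iff).mp hl with h0
        simp [pvStep, eq_of_beq hc]
      · rcases List.length_eq_one_iff.mp hl with ⟨x, hx⟩
        simp [pvStep, hx, eq_of_beq hc]
      · have h2 : ¬ ((k + 2 : Nat) ≤ 1) := by omega
        have h3 : (2 : Nat) ≤ k + 2 := by omega
        have h4 : (2 : Nat) ≤ k + 3 := by omega
        simp only [h2, h3, if_pos, pvStep]
        have hne : ((k + 2 : Nat) : Int) + 1 + 1 ≠ 2 := by push_cast; omega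
        simp only [hc, if_pos, hne, if_false]
        have hk3 : (k + 3) - 2 = k + 1 := by omega
        have hk2 : (k + 2) - 2 = k := by omega
        simp only [hk3, hk2, h4, if_pos, Prod.mk.injEq]
        refine ⟨by push_cast; ring, ?_⟩
        cases hpv : pvAidx cs (s + 1) with
        | nil => simp [hpv] at hl
        | cons y ys => simp
    · simp only [hc, List.nil_append, pvStep, Bool.false_eq_true, if_false]
      set L := (pvAidx cs (s + 1)).length with hL
      have : (if L ≤ 1 then (L : Int) else (L : Int) + 1) ≠ 2 := by
        by_cases h : L ≤ 1
        · rw [if_pos h]; omega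
        · rw [if_neg h]; omega
      simp [this]

-- loop 2 is a find-with-default over its index list
lemma pvLoop2_find (cs : List Char) (l : List Int) :
    a_posLoop2 cs l = (l.find? (fun i => PySem.List.pyGetD cs i ' ' == 'a')).getD 0 := by
  induction l with
  | nil => rfl
  | cons i rest ih =>
    by_cases h : PySem.List.pyGetD cs i ' ' == 'a' <;>
      simp [a_posLoop2, h, ih]

-- the indices of the forward range that hold 'a' are exactly pvAidx cs 0
lemma pvRange_filter (cs : List Char) :
    (PySem.List.pyRange 0 (cs.length : Int) 1).filter
        (fun i => PySem.List.pyGetD cs i ' ' == 'a') = pvAidx cs 0 := by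
  have he := PySem.List.enumerate_eq_map_pyRange (xs := cs) (d := ' ')
  rw [pvAidx, he, List.filter_map, List.map_map]
  simp [PySem.List.len, Function.comp_def]

theorem a_pos_spec : Claim_equal_a_pos := by
  intro word _
  unfold Spec_a_pos a_pos a_pos_alt
  have hrev : PySem.List.pyRange ((word.toList.length : Int) - 1) (-1) (-1) =
      (PySem.List.pyRange 0 (word.toList.length : Int) 1).reverse := by
    have := PySem.List.pyRange_neg_one_eq_reverse (a := (word.toList.length : Int) - 1) (b := -1)
    simpa using this
  simp only [PySem.Str.len_eq, hrev]
  -- first component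
  have h1 : ((PySem.List.pyRange 0 (word.toList.length : Int) 1).reverse.foldl
      (fun (st : Int × Int) i =>
        let count := if PySem.List.pyGetD word.toList i ' ' == 'a' then st.1 + 1 else st.1
        if count = 2 then (count + 1, i) else (count, st.2)) (0, 0)) =
      (PySem.List.enumerate word.toList 0).foldr (fun x acc => pvStep acc x) (0, 0) := by
    rw [List.foldl_reverse, PySem.List.enumerate_eq_map_pyRange (d := ' '), List.foldr_map]
    simp [pvStep, PySem.List.len]
  -- second component
  have h2 : a_posLoop2 word.toList ((PySem.List.pyRange 0 (word.toList.length : Int) 1).reverse) =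
      ((pvAidx word.toList 0).getLast?).getD 0 := by
    rw [pvLoop2_find, ← List.head?_filter, List.filter_reverse, List.head?_reverse,
      pvRange_filter]
  rw [h1, h2, pvLoop1_inv]
  -- now compare with B's selections from idx := pvAidx word.toList 0
  set I := pvAidx word.toList 0 with hI
  have hidx : ((PySem.List.enumerate word.toList 0).filter (fun p => p.2 == 'a')).map
      (fun p => p.1) = I := rfl
  simp only [hidx, Prod.mk.injEq]
  constructor
  · by_cases h : 2 ≤ I.length
    · have h1 : (0 : Int) < 2 := by omega
      rw [if_pos h, if_pos h, PySem.List.pyGet?_neg_ofNat I 2 (by omega) (by omega)]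
      rw [List.getD_eq_getElem?_getD]
    · simp [h]
  · by_cases h : I = []
    · simp [h]
    · rw [if_neg h, PySem.List.pyGet?_neg_ofNat I 1 (by omega)
        (by have := List.length_pos_iff.mpr h; omega)]
      rw [List.getLast?_eq_getElem?]
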